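-- pv_equiv track=rewrite | github.com/mttwht/AdventOfCode-2023 | 11.py | expand_map
-- ===== SOURCE A (Python) =====
-- EXPANSION_CONSTANT = 1000000
--
-- def expand_map(lines: list[str]) -> tuple[list[int], list[int]]:
--     row_dists, col_dists = [], []
--
--     for i, line in enumerate(lines):
--         if line.count('#') == 0:
--             row_dists.append(EXPANSION_CONSTANT)
--         else:
--             row_dists.append(1)
--
--     for i in range(len(lines[0])):
--         if [line[i] for line in lines].count('#') == 0:
--             col_dists.append(EXPANSION_CONSTANT)
--         else:
--             col_dists.append(1)
--
--     return row_dists, col_dists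
-- ===== SOURCE B (Python) =====
-- EXPANSION_CONSTANT = 1000000
--
-- def expand_map(lines: list[str]) -> tuple[list[int], list[int]]:
--     row_dists = [1 if '#' in line else EXPANSION_CONSTANT for line in lines]
--     width = len(lines[0]) if lines else 0
--     has_galaxy = [False] * width
--     for line in lines:
--         for j, ch in enumerate(line[:width]):
--             if ch == '#':
--                 has_galaxy[j] = True
--     col_dists = [1 if h else EXPANSION_CONSTANT for h in has_galaxy]
--     return row_dists, col_dists
-- ===== Notes on version B (the rewrite author's own statement) =====
-- stated objective: alternative
-- what changed: Instead of re-scanning every line per column index (building a full column list and counting '#' for each column), B does one row-major pass marking a boolean per column when a '#' is seen, then reads the marks off; same O(rows*cols) work, traded per-column rescans and allocations for a single pass.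
import Mathlib
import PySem

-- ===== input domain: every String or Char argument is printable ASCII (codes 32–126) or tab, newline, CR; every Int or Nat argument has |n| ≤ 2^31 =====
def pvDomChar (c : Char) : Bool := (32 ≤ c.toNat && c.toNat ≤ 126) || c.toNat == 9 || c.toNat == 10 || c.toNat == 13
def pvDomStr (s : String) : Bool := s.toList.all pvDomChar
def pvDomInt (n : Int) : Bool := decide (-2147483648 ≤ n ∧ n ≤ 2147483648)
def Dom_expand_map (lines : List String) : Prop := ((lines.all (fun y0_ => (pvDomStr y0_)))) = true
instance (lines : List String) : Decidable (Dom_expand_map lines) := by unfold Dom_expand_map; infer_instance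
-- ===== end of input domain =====

-- B replaces A's per-column rescans (a fresh column list + count for every column index) by one
-- row-major pass over the grid that marks a boolean per column; return values only, no mutation.

-- ===== PORT A =====
-- literal port of A: first loop appends 1000000/1 per line by line.count('#');
-- second loop, for i in range(len(lines[0])), builds the column list and counts '#'.
-- lines[0] is ported as pyGetD lines 0 "" and line[i] as pyGetD (IndexError cases are outside Pre_).
def expand_map (lines : List String) : List Int × List Int :=
  let row_dists : List Int :=
    (PySem.List.enumerate lines).foldl
      (fun acc p => if PySem.Str.count p.2 "#" = 0 then acc ++ [(1000000 : Int)] else acc ++ [(1 : Int)]) []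
  let col_dists : List Int :=
    (PySem.List.pyRange 0 (PySem.Str.len (PySem.List.pyGetD lines 0 "")) 1).foldl
      (fun acc i =>
        if PySem.List.count (lines.map (fun line => PySem.List.pyGetD line.toList i ' ')) '#' = 0
        then acc ++ [(1000000 : Int)] else acc ++ [(1 : Int)]) []
  (row_dists, col_dists)

-- ===== PORT B =====
-- inner loop of Source B: for j, ch in enumerate(line[:width]): if ch == '#': has_galaxy[j] = True
def pvMarkLine (has : List Bool) (cs : List Char) : List Bool :=
  (PySem.List.enumerate cs).foldl
    (fun h p => if p.2 = '#' then PySem.List.pySetD h p.1 true else h) has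

def expand_map_alt (lines : List String) : List Int × List Int :=
  let row_dists : List Int := lines.map (fun line => if PySem.Str.isIn "#" line then 1 else 1000000)
  let width : Nat := match lines with | [] => 0 | l :: _ => l.toList.length   -- len(lines[0]) if lines else 0
  let has_galaxy : List Bool :=
    lines.foldl (fun h line => pvMarkLine h (line.toList.take width)) (List.replicate width false)
  (row_dists, has_galaxy.map (fun b => if b then (1 : Int) else 1000000))

-- ===== PRECONDITION & SPEC =====
-- Pre_ excludes exactly the inputs where A raises IndexError: an empty list (lines[0])
-- and ragged input where some line is shorter than the first (line[i]).
def Pre_expand_map (lines : List String) : Prop :=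
  lines ≠ [] ∧ ∀ s ∈ lines, (lines.headD "").toList.length ≤ s.toList.length
instance (lines : List String) : Decidable (Pre_expand_map lines) := by unfold Pre_expand_map; infer_instance
def pvWitness_expand_map : List String := ["#.", ".."]

def Spec_expand_map (lines : List String) (out : List Int × List Int) : Prop := out = expand_map_alt lines
instance (lines : List String) (out : List Int × List Int) : Decidable (Spec_expand_map lines out) := by unfold Spec_expand_map; infer_instance

-- ===== CLAIM (what is proved, stated in full; the proofs are below) =====
def Claim_equal_expand_map : Prop := ∀ (lines : List String), Dom_expand_map lines → Pre_expand_map lines → Spec_expand_map lines (expand_map lines)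

-- ===== LEMMAS AND PROOFS =====

-- equations for PySem.Chars.count.go, used to characterise line.count('#')
theorem pvGo_nil (sub : List Char) (fuel acc : Nat) : PySem.Chars.count.go sub fuel [] acc = acc := by
  cases fuel <;> simp [PySem.Chars.count.go]

theorem pvGo_succ (sub : List Char) (fuel : Nat) (h : Char) (t : List Char) (acc : Nat) :
    PySem.Chars.count.go sub (fuel + 1) (h :: t) acc =
      if sub.isPrefixOf (h :: t) then PySem.Chars.count.go sub fuel (List.drop sub.length (h :: t)) (acc + 1)
      else PySem.Chars.count.go sub fuel t acc := by
  simp [PySem.Chars.count.go]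

theorem pvGo_single (c : Char) (s : List Char) : ∀ (fuel acc : Nat), s.length ≤ fuel →
    PySem.Chars.count.go [c] fuel s acc = acc + s.count c := by
  induction s with
  | nil => intro fuel acc _; simp [pvGo_nil]
  | cons h t ih =>
    intro fuel acc hf
    cases fuel with
    | zero => simp at hf
    | succ f =>
      rw [pvGo_succ]
      by_cases hc : c = h
      · subst hc
        simp [List.isPrefixOf, ih f (acc + 1) (by simpa using hf)]
        omega
      · simp [List.isPrefixOf, Ne.symm hc, hc, ih f acc (by simpa using hf)]

theorem pvCount_single_eq_zero_iff (c : Char) (s : List Char) :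
    (PySem.Chars.count s [c] = 0) ↔ c ∉ s := by
  have h : PySem.Chars.count s [c] = s.count c := by
    have := pvGo_single c s s.length 0 le_rfl
    simpa [PySem.Chars.count] using this
  rw [h, List.count_eq_zero]

theorem pvSingleton_infix_iff (c : Char) (s : List Char) : [c] <:+: s ↔ c ∈ s := by
  constructor
  · intro h; exact List.singleton_sublist.mp h.sublist
  · intro h; obtain ⟨l, r, rfl⟩ := List.append_of_mem h; exact ⟨l, r, by simp⟩

-- the two row tests agree: line.count('#') == 0 vs '#' in line
theorem pvRow_entry (line : String) :
    (if PySem.Str.count line "#" = 0 then (1000000 : Int) else 1) =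
    (if PySem.Str.isIn "#" line then 1 else 1000000) := by
  have hc : PySem.Str.count line "#" = PySem.Chars.count line.toList ['#'] := PySem.Str.count_eq line "#"
  by_cases h : '#' ∈ line.toList
  · have hnz : ¬ (PySem.Str.count line "#" = 0) := by
      rw [hc]; exact fun h0 => ((pvCount_single_eq_zero_iff _ _).mp h0) h
    rw [if_neg hnz, if_pos ((PySem.Str.isIn_iff_infix "#" line).mpr ((pvSingleton_infix_iff '#' line.toList).mpr h))]
  · have hz : PySem.Str.count line "#" = 0 := by
      rw [hc]; exact (pvCount_single_eq_zero_iff _ _).mpr h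
    have hni : ¬ (PySem.Str.isIn "#" line = true) := fun hin =>
      h ((pvSingleton_infix_iff '#' line.toList).mp ((PySem.Str.isIn_iff_infix "#" line).mp hin))
    rw [if_pos hz, if_neg hni]

-- A's row loop produces exactly B's row list
theorem pvRows_eq (lines : List String) :
    (PySem.List.enumerate lines).foldl
      (fun acc p => if PySem.Str.count p.2 "#" = 0 then acc ++ [(1000000 : Int)] else acc ++ [(1 : Int)]) [] =
    lines.map (fun line => if PySem.Str.isIn "#" line then 1 else 1000000) := by
  rw [PySem.List.foldl_congr_mem _ _
      (fun acc p => acc ++ [if PySem.Str.isIn "#" p.2 then (1 : Int) else 1000000]) _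
      (by intro acc x _
          show _ = acc ++ [if PySem.Str.isIn "#" x.2 = true then (1 : Int) else 1000000]
          rw [← pvRow_entry x.2]; split <;> rfl)]
  rw [PySem.List.foldl_append_singleton_eq_map]
  rw [← PySem.List.map_snd_enumerate lines 0, List.map_map]
  simp

-- the enumerate-fold never touches positions below its start index
theorem pvMark_shift (cs : List Char) : ∀ (s : Nat) (b : Bool) (has : List Bool),
    (PySem.List.enumerate cs ((s : Int) + 1)).foldl
      (fun h p => if p.2 = '#' then PySem.List.pySetD h p.1 true else h) (b :: has) =
    b :: (PySem.List.enumerate cs (s : Int)).foldl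
      (fun h p => if p.2 = '#' then PySem.List.pySetD h p.1 true else h) has := by
  induction cs with
  | nil => intro s b has; simp [PySem.List.enumerate]
  | cons c cs ih =>
    intro s b has
    rw [PySem.List.enumerate_cons, PySem.List.enumerate_cons]
    simp only [List.foldl_cons]
    have hcast : ((s : Int) + 1) = ((s + 1 : Nat) : Int) := by push_cast; ring
    by_cases hc : c = '#'
    · rw [if_pos hc, if_pos hc]
      rw [hcast, PySem.List.pySetD_natCast, PySem.List.pySetD_natCast, List.set_cons_succ]
      exact ih (s + 1) b (has.set s true)
    · rw [if_neg hc, if_neg hc]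
      rw [hcast]
      exact ih (s + 1) b has

-- closed form of Source B's inner loop: position-wise or with "this char is '#'"
theorem pvMarkLine_eq (cs : List Char) : ∀ (has : List Bool), cs.length = has.length →
    pvMarkLine has cs = List.zipWith (fun b c => b || decide (c = '#')) has cs := by
  induction cs with
  | nil =>
    intro has h
    have : has = [] := List.eq_nil_of_length_eq_zero (by simpa using h.symm)
    subst this; simp [pvMarkLine, PySem.List.enumerate]
  | cons c cs ih =>
    intro has h
    cases has with
    | nil => simp at h
    | cons b has =>
      unfold pvMarkLine
      rw [PySem.List.enumerate_cons]
      simp only [List.foldl_cons]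
      have step : (if c = '#' then PySem.List.pySetD (b :: has) 0 true else b :: has) =
          (b || decide (c = '#')) :: has := by
        by_cases hc : c = '#'
        · rw [if_pos hc]; simp [hc, PySem.List.pySetD, PySem.List.pySet?, PySem.List.pyIdx?]
        · rw [if_neg hc]; simp [hc]
      rw [step]
      have hsh := pvMark_shift cs 0 (b || decide (c = '#')) has
      norm_num at hsh ⊢
      rw [hsh]
      congr 1
      have := ih has (by simpa using h)
      unfold pvMarkLine at this
      exact this

-- invariant of Source B's outer loop: mark j set iff some processed line has '#' in column j
theorem pvHas_spec (w : Nat) (lines : List String)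
    (hw : ∀ s ∈ lines, w ≤ s.toList.length) :
    ∀ (init : List Bool), init.length = w →
      (lines.foldl (fun h line => pvMarkLine h (line.toList.take w)) init).length = w ∧
      ∀ j < w, (lines.foldl (fun h line => pvMarkLine h (line.toList.take w)) init).getD j false =
        (init.getD j false || lines.any (fun line => decide (line.toList.getD j ' ' = '#'))) := by
  induction lines with
  | nil => intro init hlen; exact ⟨hlen, by simp⟩
  | cons line rest ih =>
    intro init hlen
    have hwl : w ≤ line.toList.length := hw line (by simp)
    have hwl2 : w ≤ line.length := by simpa using hwl
    have hcs : (line.toList.take w).length = init.length := by simp [hlen]; omega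
    simp only [List.foldl_cons]
    have heq := pvMarkLine_eq (line.toList.take w) init hcs
    have hlen' : (pvMarkLine init (line.toList.take w)).length = w := by
      rw [heq]; simp [hlen]; omega
    obtain ⟨h1, h2⟩ := ih (fun s hs => hw s (by simp [hs])) (pvMarkLine init (line.toList.take w)) hlen'
    refine ⟨h1, fun j hj => ?_⟩
    rw [h2 j hj, heq]
    rw [List.getD_eq_getElem _ _ (by simp [hlen]; omega), List.getElem_zipWith]
    rw [List.getElem_take, List.getD_eq_getElem _ _ (by omega)]
    rw [List.any_cons, List.getD_eq_getElem _ _ (by omega : j < line.toList.length)]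
    simp [Bool.or_assoc]

-- the two column tests agree: column-list count vs any-mark
theorem pvCol_entry (lines : List String) (j : Nat) :
    (if PySem.List.count (lines.map fun line => PySem.List.pyGetD line.toList (j : Int) ' ') '#' = 0
     then (1000000 : Int) else 1) =
    (if lines.any (fun line => decide (line.toList.getD j ' ' = '#')) then 1 else 1000000) := by
  have hiff : (PySem.List.count (lines.map fun line => PySem.List.pyGetD line.toList (j : Int) ' ') '#' = 0)
      ↔ ¬ (lines.any (fun line => decide (line.toList.getD j ' ' = '#')) = true) := by
    rw [PySem.List.count_eq, List.count_eq_zero, List.any_eq_true]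
    simp only [List.mem_map, not_exists, not_and, PySem.List.pyGetD_natCast, decide_eq_true_eq]
  by_cases hc : lines.any (fun line => decide (line.toList.getD j ' ' = '#')) = true
  · rw [if_neg (fun h => (hiff.mp h) hc), if_pos hc]
  · rw [if_pos (hiff.mpr hc), if_neg hc]

theorem pvMain (lines : List String) (hpre : Pre_expand_map lines) :
    expand_map lines = expand_map_alt lines := by
  obtain ⟨hne, hmin⟩ := hpre
  cases lines with
  | nil => exact absurd rfl hne
  | cons l t =>
    simp only [expand_map, expand_map_alt]
    rw [pvRows_eq (l :: t)]
    refine congrArg _ ?_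
    have hw0 : PySem.Str.len (PySem.List.pyGetD (l :: t) 0 "") = (l.toList.length : Int) := by
      simp [PySem.List.pyGetD, PySem.Str.len_eq]
    rw [hw0]
    set w := l.toList.length with hwdef
    have hwall : ∀ s ∈ l :: t, w ≤ s.toList.length := by
      intro s hs; simpa using hmin s hs
    rw [PySem.List.pyRange_zero_natCast, List.foldl_map]
    rw [PySem.List.foldl_congr_mem _ _
      (fun acc j => acc ++ [if (l :: t).any (fun line => decide (line.toList.getD j ' ' = '#')) then (1 : Int) else 1000000]) _
      (by intro acc j _
          show _ = acc ++ [if (l :: t).any (fun line => decide (line.toList.getD j ' ' = '#')) then (1 : Int) else 1000000]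
          rw [← pvCol_entry (l :: t) j]; split <;> rfl)]
    rw [PySem.List.foldl_append_singleton_eq_map, List.nil_append]
    obtain ⟨hlenR, hgetR⟩ := pvHas_spec w (l :: t) hwall (List.replicate w false) (by simp)
    apply List.ext_getElem
    · simp only [List.length_map, List.length_range]; exact hlenR.symm
    · intro j hj1 hj2
      simp only [List.getElem_map, List.getElem_range]
      have hjw : j < w := by simpa using hj1
      have := hgetR j hjw
      rw [List.getD_eq_getElem _ _ (by omega)] at this
      rw [this]
      simp

-- ===== VERDICT (by name: the statement is the Claim_ definition above) =====
theorem expand_map_spec : Claim_equal_expand_map := by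
  intro lines _ hpre
  show expand_map lines = expand_map_alt lines
  exact pvMain lines hpre
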